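-- pv_equiv track=rewrite | github.com/xinke-wang/LVLM-Playground | playground/games/reversi/reversi_qa.py | _get_row_with_most_pieces
-- ===== SOURCE A (Python) =====
-- def _get_row_with_most_pieces(game_state, symbol):
--     symbol_value = 1 if symbol == 'Black' else 2
--     row_counts = [row.count(symbol_value) for row in game_state]
--     max_count = max(row_counts)
--     row_index = row_counts.index(max_count)
--     row_mapping = {
--         0: 'A',
--         1: 'B',
--         2: 'C',
--         3: 'D',
--         4: 'E',
--         5: 'F',
--         6: 'G',
--         7: 'H'
--     }
--     return row_mapping[row_index]
-- ===== SOURCE B (Python) =====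
-- def _get_row_with_most_pieces(game_state, symbol):
--     value = 1 if symbol == 'Black' else 2
--     best_index = -1
--     best_count = -1
--     for index, row in enumerate(game_state):
--         c = row.count(value)
--         if c > best_count:
--             best_index = index
--             best_count = c
--     if best_index < 0:
--         raise ValueError('empty game_state')
--     return 'ABCDEFGH'[best_index]
-- ===== Notes on version B (the rewrite author's own statement) =====
-- stated objective: alternative
-- what changed: Single manual scan maintaining a running best count/index (strict > keeps the first maximal row) replaces A's three passes (build a counts list, max(), list.index()) and its dict, which becomes a string index.
import Mathlib
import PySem

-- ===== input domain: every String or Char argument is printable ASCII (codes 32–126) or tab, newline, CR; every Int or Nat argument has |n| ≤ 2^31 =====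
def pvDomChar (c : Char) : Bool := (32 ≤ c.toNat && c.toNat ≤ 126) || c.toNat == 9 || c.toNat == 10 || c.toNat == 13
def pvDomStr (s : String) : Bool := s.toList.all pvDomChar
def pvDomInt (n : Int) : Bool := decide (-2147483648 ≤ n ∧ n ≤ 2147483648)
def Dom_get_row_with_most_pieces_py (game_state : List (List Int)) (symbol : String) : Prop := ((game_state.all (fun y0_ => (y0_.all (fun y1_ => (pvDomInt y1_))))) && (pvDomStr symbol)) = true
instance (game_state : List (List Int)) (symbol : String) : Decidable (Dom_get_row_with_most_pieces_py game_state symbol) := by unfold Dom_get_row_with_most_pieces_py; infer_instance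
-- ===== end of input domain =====

-- B replaces A's three passes (counts list, max(), list.index()) and its dict by one
-- manual scan keeping the first maximal row and a string index ('alternative').

-- ===== PORT A =====
def get_row_with_most_pieces_py (game_state : List (List Int)) (symbol : String) : String :=
  let symbol_value : Int := if symbol == "Black" then 1 else 2
  let row_counts : List Nat := game_state.map (fun row => PySem.List.count row symbol_value)
  match PySem.List.max? row_counts (fun y => y) with
  | none => ""  -- Python: ValueError on an empty list (excluded by Pre_)
  | some max_count =>
    match PySem.List.index? row_counts max_count with
    | none => ""  -- unreachable: max_count ∈ row_counts
    | some row_index =>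
      match (PySem.Dict.ofList [((0:Int),"A"),((1:Int),"B"),((2:Int),"C"),((3:Int),"D"),
                                ((4:Int),"E"),((5:Int),"F"),((6:Int),"G"),((7:Int),"H")]).get? (row_index : Int) with
      | some s => s
      | none => ""  -- Python: KeyError (excluded by Pre_)

-- ===== PORT B =====
def get_row_with_most_pieces_py_alt (game_state : List (List Int)) (symbol : String) : String :=
  let value : Int := if symbol == "Black" then 1 else 2
  let st : Int × Int :=
    (PySem.List.enumerate game_state).foldl
      (fun (st : Int × Int) p =>
        let c : Int := (PySem.List.count p.2 value : Nat)
        if c > st.2 then (p.1, c) else st)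
      (-1, -1)
  if st.1 < 0 then ""  -- Python: raise ValueError (excluded by Pre_)
  else
    match PySem.Str.pyGet? "ABCDEFGH" st.1 with
    | some ch => ch.toString  -- a 1-character Python str
    | none => ""  -- Python: IndexError (excluded by Pre_)

-- ===== PRECONDITION & SPEC =====
def pvSym (symbol : String) : Int := if symbol == "Black" then 1 else 2

-- Pre_ excludes exactly the inputs on which A raises: the empty board (ValueError from
-- max()) and boards whose first row of maximal count has index ≥ 8 (KeyError from the dict).
def Pre_get_row_with_most_pieces_py (game_state : List (List Int)) (symbol : String) : Prop :=
  game_state ≠ [] ∧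
  ∃ i, i < 8 ∧ i < game_state.length ∧ ∀ j, j < game_state.length →
    PySem.List.count (game_state.getD j []) (pvSym symbol) ≤
      PySem.List.count (game_state.getD i []) (pvSym symbol)
instance (game_state : List (List Int)) (symbol : String) : Decidable (Pre_get_row_with_most_pieces_py game_state symbol) := by unfold Pre_get_row_with_most_pieces_py; infer_instance

def pvWitness_get_row_with_most_pieces_py : List (List Int) × String := ([[1,0],[1,1]], "Black")

def Spec_get_row_with_most_pieces_py (game_state : List (List Int)) (symbol : String) (out : String) : Prop := out = get_row_with_most_pieces_py_alt game_state symbol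
instance (game_state : List (List Int)) (symbol : String) (out : String) : Decidable (Spec_get_row_with_most_pieces_py game_state symbol out) := by unfold Spec_get_row_with_most_pieces_py; infer_instance

-- ===== CLAIM (what is proved, stated in full; the proofs are below) =====
def Claim_equal_get_row_with_most_pieces_py : Prop := ∀ (game_state : List (List Int)) (symbol : String), Dom_get_row_with_most_pieces_py game_state symbol → Pre_get_row_with_most_pieces_py game_state symbol → Spec_get_row_with_most_pieces_py game_state symbol (get_row_with_most_pieces_py game_state symbol)

-- ===== LEMMAS AND PROOFS =====

-- one step of the first-argmax recursion
def pvFmStep (o : Option (Nat × Nat)) (c : Nat) : Option (Nat × Nat) :=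
  match o with
  | none => some (0, c)
  | some (i, m) => if m > c then some (i + 1, m) else some (0, c)

-- first-argmax of a list of counts: (first index achieving the maximum, the maximum)
def pvFm : List Nat → Option (Nat × Nat)
  | [] => none
  | c :: cs => pvFmStep (pvFm cs) c

-- what the B-side loop does with the tail's first-argmax
def pvStep (o : Option (Nat × Nat)) (k j m : Int) : Int × Int :=
  match o with
  | none => (j, m)
  | some (i, c) => if (c : Int) > m then (k + i, (c : Int)) else (j, m)

theorem pvFmStep_none (c : Nat) : pvFmStep none c = some (0, c) := rfl
theorem pvFmStep_some (i m c : Nat) :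
    pvFmStep (some (i, m)) c = if m > c then some (i + 1, m) else some (0, c) := rfl
theorem pvStep_none (k j m : Int) : pvStep none k j m = (j, m) := rfl
theorem pvStep_some (i c : Nat) (k j m : Int) :
    pvStep (some (i, c)) k j m = if (c : Int) > m then (k + i, (c : Int)) else (j, m) := rfl

theorem pvFmStep_ne_none (o : Option (Nat × Nat)) (c : Nat) : pvFmStep o c ≠ none := by
  cases o with
  | none => simp [pvFmStep]
  | some p => obtain ⟨i, m⟩ := p; simp only [pvFmStep]; split <;> simp

theorem pvFm_eq_none_iff (cs : List Nat) : pvFm cs = none ↔ cs = [] := by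
  cases cs with
  | nil => simp [pvFm]
  | cons c cs =>
    simp only [pvFm]
    constructor
    · intro h; exact absurd h (pvFmStep_ne_none _ _)
    · intro h; exact absurd h (List.cons_ne_nil _ _)

theorem pvFm_key (cs : List Nat) (i m : Nat) (h : pvFm cs = some (i, m)) :
    (∀ y ∈ cs, y ≤ m) ∧ PySem.List.index? cs m = some i ∧
      ∀ j, j < i → cs.getD j 0 < m := by
  induction cs generalizing i m with
  | nil => simp [pvFm] at h
  | cons c cs ih =>
    simp only [pvFm] at h
    rcases hfm : pvFm cs with _ | ⟨i', m'⟩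
    · rw [hfm, pvFmStep_none] at h
      have hnil : cs = [] := (pvFm_eq_none_iff cs).mp hfm
      simp at h
      subst hnil
      obtain ⟨hi, hm⟩ := h
      subst hi; subst hm
      refine ⟨by simp, ?_, by omega⟩
      rw [PySem.List.index?_cons_self]
    · rw [hfm, pvFmStep_some] at h
      obtain ⟨hb, hidx, hmin⟩ := ih i' m' hfm
      by_cases hgt : m' > c
      · rw [if_pos hgt] at h
        simp at h
        obtain ⟨hi, hm⟩ := h
        subst hi; subst hm
        have hne : c ≠ m' := by omega
        refine ⟨?_, ?_, ?_⟩
        · intro y hy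
          rcases List.mem_cons.mp hy with rfl | hy
          · omega
          · exact hb y hy
        · rw [PySem.List.index?_cons_of_ne cs hne, hidx]; rfl
        · intro j hj
          cases j with
          | zero => simpa using hgt
          | succ j' => simpa using hmin j' (by omega)
      · rw [if_neg hgt] at h
        simp at h
        obtain ⟨hi, hm⟩ := h
        subst hi; subst hm
        refine ⟨?_, ?_, by omega⟩
        · intro y hy
          rcases List.mem_cons.mp hy with rfl | hy
          · exact le_refl _
          · exact le_trans (hb y hy) (by omega)
        · rw [PySem.List.index?_cons_self]

-- the B-side loop, run from an arbitrary accumulator, computes the first argmax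
theorem pvFoldB (gs : List (List Int)) (v : Int) (k j m : Int) :
    (PySem.List.enumerate gs k).foldl
        (fun (st : Int × Int) p =>
          let c : Int := ((PySem.List.count p.2 v : Nat) : Int)
          if c > st.2 then (p.1, c) else st)
        (j, m) =
      pvStep (pvFm (gs.map (fun r => PySem.List.count r v))) k j m := by
  induction gs generalizing k j m with
  | nil => rfl
  | cons r gs ih =>
    rw [PySem.List.enumerate_cons, List.foldl_cons, List.map_cons]
    have hred : (let c : Int := ((PySem.List.count ((k, r) : Int × List Int).2 v : Nat) : Int);
          if c > ((j, m) : Int × Int).2 then (((k, r) : Int × List Int).1, c) else (j, m))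
        = if ((PySem.List.count r v : Nat) : Int) > m
            then (k, ((PySem.List.count r v : Nat) : Int)) else (j, m) := rfl
    rw [hred]
    rw [show pvFm (PySem.List.count r v :: gs.map (fun r => PySem.List.count r v))
          = pvFmStep (pvFm (gs.map (fun r => PySem.List.count r v))) (PySem.List.count r v) from rfl]
    rcases hfm : pvFm (gs.map (fun r => PySem.List.count r v)) with _ | ⟨i', c'⟩
    · rw [pvFmStep_none]
      by_cases h0 : ((PySem.List.count r v : Nat) : Int) > m
      · rw [if_pos h0, ih, hfm, pvStep_none, pvStep_some, if_pos h0]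
        norm_num
      · rw [if_neg h0, ih, hfm, pvStep_none, pvStep_some, if_neg h0]
    · rw [pvFmStep_some]
      by_cases hc : c' > PySem.List.count r v
      · rw [if_pos hc]
        by_cases h0 : ((PySem.List.count r v : Nat) : Int) > m
        · rw [if_pos h0, ih, hfm, pvStep_some, pvStep_some]
          rw [if_pos (show ((c' : Nat) : Int) > ((PySem.List.count r v : Nat) : Int) by omega)]
          rw [if_pos (show ((c' : Nat) : Int) > m by omega)]
          simp only [Prod.mk.injEq]
          constructor
          · push_cast; ring
          · trivial
        · rw [if_neg h0, ih, hfm, pvStep_some, pvStep_some]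
          by_cases hcm : ((c' : Nat) : Int) > m
          · rw [if_pos hcm, if_pos hcm]
            simp only [Prod.mk.injEq]
            constructor
            · push_cast; ring
            · trivial
          · rw [if_neg hcm, if_neg hcm]
      · rw [if_neg hc]
        by_cases h0 : ((PySem.List.count r v : Nat) : Int) > m
        · rw [if_pos h0, ih, hfm, pvStep_some, pvStep_some]
          rw [if_neg (show ¬ ((c' : Nat) : Int) > ((PySem.List.count r v : Nat) : Int) by omega)]
          rw [if_pos h0]
          norm_num
        · rw [if_neg h0, ih, hfm, pvStep_some, pvStep_some]
          rw [if_neg (show ¬ ((c' : Nat) : Int) > m by omega)]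
          rw [if_neg h0]

-- ===== VERDICT (by name: the statement is the Claim_ definition above) =====
theorem get_row_with_most_pieces_py_spec : Claim_equal_get_row_with_most_pieces_py := by
  intro gs symbol _hdom hpre
  unfold Spec_get_row_with_most_pieces_py
  obtain ⟨hne, i', hi'8, hi'len, hmax⟩ := hpre
  set v : Int := pvSym symbol with hv
  set cs : List Nat := gs.map (fun r => PySem.List.count r v) with hcs
  have hlen : cs.length = gs.length := by simp [hcs]
  have hcs_ne : cs ≠ [] := by simp [hcs, hne]
  rcases hfm : pvFm cs with _ | ⟨i, m⟩
  · exact absurd ((pvFm_eq_none_iff cs).mp hfm) hcs_ne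
  obtain ⟨hb, hidx, hmin⟩ := pvFm_key cs i m hfm
  have hmem : m ∈ cs := by
    have h := (PySem.List.index?_isSome_iff cs m).mp
    rw [hidx] at h; exact h rfl
  -- the Pre_ witness row attains the maximum, hence the first argmax sits at index < 8
  have hgetD : ∀ j, (hj : j < gs.length) → cs.getD j 0 = PySem.List.count (gs.getD j []) v := by
    intro j hj
    have hj2 : j < cs.length := by omega
    rw [List.getD_eq_getElem cs 0 hj2, List.getD_eq_getElem gs [] hj]
    simp [hcs]
  have hwle : cs.getD i' 0 ≤ m := by
    refine hb _ ?_
    rw [List.getD_eq_getElem cs 0 (by omega)]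
    exact List.getElem_mem _
  have hlew : m ≤ cs.getD i' 0 := by
    obtain ⟨j, hj, hjm⟩ := List.mem_iff_getElem.mp hmem
    have hj' : j < gs.length := by omega
    have hjD : cs.getD j 0 = m := by rw [List.getD_eq_getElem cs 0 hj]; exact hjm
    rw [hgetD i' hi'len]
    rw [hgetD j hj'] at hjD
    rw [← hjD]
    exact hmax j hj'
  have hi8 : i < 8 := by
    by_contra hcon
    have h1 := hmin i' (by omega)
    omega
  -- A's max() returns the value pvFm computes
  have hmax? : PySem.List.max? cs (fun y => y) = some m := by
    rcases h' : PySem.List.max? cs (fun y => y) with _ | m''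
    · exact absurd ((PySem.List.max?_eq_none_iff cs _).mp h') hcs_ne
    · have h1 := PySem.List.max?_isMax h' m hmem
      have h2 := hb m'' (PySem.List.max?_mem h')
      have h3 : m'' = m := by omega
      rw [h3]
  -- reduce port A to the dictionary lookup at index i
  have hA : get_row_with_most_pieces_py gs symbol =
      (match (PySem.Dict.ofList [((0:Int),"A"),((1:Int),"B"),((2:Int),"C"),((3:Int),"D"),
                                 ((4:Int),"E"),((5:Int),"F"),((6:Int),"G"),((7:Int),"H")]).get? ((i : Nat) : Int) with
       | some s => s
       | none => "") := by
    rw [show get_row_with_most_pieces_py gs symbol =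
        (match PySem.List.max? cs (fun y => y) with
         | none => ""
         | some max_count =>
           match PySem.List.index? cs max_count with
           | none => ""
           | some row_index =>
             match (PySem.Dict.ofList [((0:Int),"A"),((1:Int),"B"),((2:Int),"C"),((3:Int),"D"),
                                       ((4:Int),"E"),((5:Int),"F"),((6:Int),"G"),((7:Int),"H")]).get? ((row_index : Nat) : Int) with
             | some s => s
             | none => "") from rfl]
    rw [hmax?]
    show (match PySem.List.index? cs m with
          | none => ""
          | some row_index =>
            match (PySem.Dict.ofList [((0:Int),"A"),((1:Int),"B"),((2:Int),"C"),((3:Int),"D"),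
                                      ((4:Int),"E"),((5:Int),"F"),((6:Int),"G"),((7:Int),"H")]).get? ((row_index : Nat) : Int) with
            | some s => s
            | none => "") = _
    rw [hidx]
  -- reduce port B to the string index at i
  have hB : get_row_with_most_pieces_py_alt gs symbol =
      (match PySem.Str.pyGet? "ABCDEFGH" ((i : Nat) : Int) with
       | some ch => ch.toString
       | none => "") := by
    rw [show get_row_with_most_pieces_py_alt gs symbol =
        (if (((PySem.List.enumerate gs 0).foldl
                (fun (st : Int × Int) p =>
                  let c : Int := ((PySem.List.count p.2 v : Nat) : Int)
                  if c > st.2 then (p.1, c) else st) ((-1 : Int), (-1 : Int))).1 < 0) then ""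
         else
           match PySem.Str.pyGet? "ABCDEFGH"
               (((PySem.List.enumerate gs 0).foldl
                  (fun (st : Int × Int) p =>
                    let c : Int := ((PySem.List.count p.2 v : Nat) : Int)
                    if c > st.2 then (p.1, c) else st) ((-1 : Int), (-1 : Int))).1) with
           | some ch => ch.toString
           | none => "") from rfl]
    rw [pvFoldB gs v 0 (-1) (-1), hfm, pvStep_some]
    rw [if_pos (show ((m : Nat) : Int) > -1 by omega)]
    rw [show (((0 : Int) + ((i : Nat) : Int), ((m : Nat) : Int)) : Int × Int).1 = ((i : Nat) : Int) by norm_num]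
    rw [if_neg (show ¬ (((i : Nat) : Int) < 0) by omega)]
  rw [hA, hB]
  interval_cases i <;> rfl
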